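-- pv_equiv track=rewrite | github.com/LucasEngProd/Inferential-Statistics-for-APS | aps.py | max_lateness
-- ===== SOURCE A (Python) =====
-- def max_lateness(pj, dj):
--     lmax = 0
--     final_pj = []
--     for c in range(0, len(pj)):
--         if c == 0:
--             final_pj.append(pj[c])
--             lmax = final_pj[c] - dj[c]
--         else:
--             final_pj.append(pj[c] + final_pj[c - 1])
--             if lmax < final_pj[c] - dj[c]:
--                 lmax = final_pj[c] - dj[c]
--     if lmax < 0:
--         lmax = 0
--     return lmax
-- ===== SOURCE B (Python) =====
-- def max_lateness(pj, dj):
--     # Right-to-left Kadane-style scan: `best` is the maximum lateness among the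
--     # jobs of the current suffix as if that suffix started at time 0 (prepending
--     # job i shifts every later completion by pj[i]); no prefix sums are kept.
--     best = None
--     for i in range(len(pj) - 1, -1, -1):
--         if best is None:
--             best = pj[i] - dj[i]
--         else:
--             best = pj[i] + max(-dj[i], best)
--     return 0 if best is None or best < 0 else best
-- ===== Notes on version B (the rewrite author's own statement) =====
-- stated objective: alternative
-- what changed: Replaces A's forward prefix-sum accumulation with running-max tracking by a right-to-left Kadane-style scan that maintains the best suffix-relative lateness and never materialises completion times.
import Mathlib
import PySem

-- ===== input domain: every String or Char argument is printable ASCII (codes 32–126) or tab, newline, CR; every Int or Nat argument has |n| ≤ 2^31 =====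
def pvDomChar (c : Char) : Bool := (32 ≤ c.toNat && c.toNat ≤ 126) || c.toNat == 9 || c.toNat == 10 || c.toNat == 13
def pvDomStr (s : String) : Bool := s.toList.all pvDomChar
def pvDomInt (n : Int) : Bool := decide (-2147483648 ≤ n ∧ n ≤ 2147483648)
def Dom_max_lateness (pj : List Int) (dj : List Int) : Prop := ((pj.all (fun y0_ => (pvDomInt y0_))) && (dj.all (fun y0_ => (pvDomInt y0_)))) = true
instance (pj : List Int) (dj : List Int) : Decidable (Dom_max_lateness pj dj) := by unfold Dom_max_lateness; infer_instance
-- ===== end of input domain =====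

-- B replaces A's forward prefix-sum accumulation with running-max tracking by a
-- right-to-left Kadane-style scan maintaining the best suffix-relative lateness;
-- no completion times are materialised. Same O(n) time, O(1) extra space.

-- ===== PORT A =====
def max_lateness (pj : List Int) (dj : List Int) : Int :=
  let st := (PySem.List.pyRange 0 (PySem.List.len pj) 1).foldl
    (fun (st : Int × List Int) c =>
      if c == 0 then
        let fp := st.2 ++ [PySem.List.pyGetD pj c 0]
        (PySem.List.pyGetD fp c 0 - PySem.List.pyGetD dj c 0, fp)
      else
        let fp := st.2 ++ [PySem.List.pyGetD pj c 0 + PySem.List.pyGetD st.2 (c - 1) 0]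
        let v := PySem.List.pyGetD fp c 0 - PySem.List.pyGetD dj c 0
        (if st.1 < v then v else st.1, fp))
    (0, ([] : List Int))
  if st.1 < 0 then 0 else st.1

-- ===== PORT B =====
-- transliteration of Source B: best = None; for i in range(len(pj)-1, -1, -1): …
def max_lateness_alt (pj : List Int) (dj : List Int) : Int :=
  let best := (PySem.List.pyRange (PySem.List.len pj - 1) (-1) (-1)).foldl
    (fun (b : Option Int) i =>
      match b with
      | none => some (PySem.List.pyGetD pj i 0 - PySem.List.pyGetD dj i 0)
      | some v => some (PySem.List.pyGetD pj i 0 + max (-(PySem.List.pyGetD dj i 0)) v))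
    none
  match best with
  | none => 0
  | some v => if v < 0 then 0 else v

-- ===== PRECONDITION & SPEC =====
-- Both A and B raise IndexError (dj[c]) exactly when dj is shorter than pj.
def Pre_max_lateness (pj : List Int) (dj : List Int) : Prop := pj.length ≤ dj.length
instance (pj : List Int) (dj : List Int) : Decidable (Pre_max_lateness pj dj) := by
  unfold Pre_max_lateness; infer_instance

def pvWitness_max_lateness : List Int × List Int := ([2, 1, 3], [1, 5, 4])

def Spec_max_lateness (pj : List Int) (dj : List Int) (out : Int) : Prop := out = max_lateness_alt pj dj
instance (pj : List Int) (dj : List Int) (out : Int) : Decidable (Spec_max_lateness pj dj out) := by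
  unfold Spec_max_lateness; infer_instance

-- ===== CLAIM (what is proved, stated in full; the proofs are below) =====
def Claim_equal_max_lateness : Prop := ∀ (pj : List Int) (dj : List Int), Dom_max_lateness pj dj → Pre_max_lateness pj dj → Spec_max_lateness pj dj (max_lateness pj dj)

-- ===== LEMMAS AND PROOFS =====

-- lateness of job i: completion time (sum of the first i+1 processing times) minus due date
def pvLate (pj dj : List Int) (i : Nat) : Int := (pj.take (i+1)).sum - dj.getD i 0
-- the prefix-sum list after k steps
def pvPref (pj : List Int) (k : Nat) : List Int := (List.range k).map (fun i => (pj.take (i+1)).sum)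
-- A's running max after k loop iterations
def pvLmax (pj dj : List Int) : Nat → Int
  | 0 => 0
  | k+1 => ((List.range k).map (fun i => pvLate pj dj (i+1))).foldl max (pvLate pj dj 0)

lemma pvLmax_succ (pj dj : List Int) (j : Nat) :
    pvLmax pj dj (j+2) = max (pvLmax pj dj (j+1)) (pvLate pj dj (j+1)) := by
  simp [pvLmax, List.range_succ, List.foldl_append]

lemma pvS_succ (pj : List Int) (k : Nat) (hk : k < pj.length) :
    (pj.take (k+1)).sum = (pj.take k).sum + pj.getD k 0 := by
  rw [List.sum_take_succ]
  · simp [List.getD, List.getElem?_eq_getElem hk]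
  · exact hk

lemma pvPref_getD (pj : List Int) (k i : Nat) (h : i < k) :
    (pvPref pj k).getD i 0 = (pj.take (i+1)).sum := by
  simp [pvPref, List.getD, h]

lemma pvPref_succ (pj : List Int) (k : Nat) :
    pvPref pj (k+1) = pvPref pj k ++ [(pj.take (k+1)).sum] := by
  simp [pvPref, List.range_succ]

lemma hprefg (pj : List Int) (k : Nat) (hk1 : 1 ≤ k) :
    (pvPref pj k).getD (k-1) 0 = (pj.take k).sum := by
  have := pvPref_getD pj k (k-1) (by omega)
  rwa [Nat.sub_add_cancel hk1] at this

lemma hfp (pj : List Int) (k : Nat) (hklt : k < pj.length) :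
    pvPref pj k ++ [pj.getD k 0 + (pj.take k).sum] = pvPref pj (k+1) := by
  rw [pvPref_succ, pvS_succ pj k hklt]
  ring_nf

lemma hfpg (pj : List Int) (k : Nat) :
    (pvPref pj (k+1)).getD k 0 = (pj.take (k+1)).sum :=
  pvPref_getD pj (k+1) k (by omega)

lemma aloop (pj dj : List Int) (k : Nat) (hk : k ≤ pj.length) :
    (PySem.List.pyRange 0 (k : Int) 1).foldl
      (fun (st : Int × List Int) c =>
        if c == 0 then
          let fp := st.2 ++ [PySem.List.pyGetD pj c 0]
          (PySem.List.pyGetD fp c 0 - PySem.List.pyGetD dj c 0, fp)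
        else
          let fp := st.2 ++ [PySem.List.pyGetD pj c 0 + PySem.List.pyGetD st.2 (c - 1) 0]
          let v := PySem.List.pyGetD fp c 0 - PySem.List.pyGetD dj c 0
          (if st.1 < v then v else st.1, fp))
      (0, ([] : List Int)) = (pvLmax pj dj k, pvPref pj k) := by
  induction k with
  | zero => simp [PySem.List.pyRange_one_eq_nil, pvLmax, pvPref]
  | succ k ih =>
    have hk' : k ≤ pj.length := Nat.le_of_succ_le hk
    have hcast : ((k+1 : Nat) : Int) = (k : Int) + 1 := by push_cast; ring
    rw [hcast, PySem.List.pyRange_one_succ_right (by positivity), List.foldl_append,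
        ih hk']
    by_cases hk0 : k = 0
    · subst hk0
      have hpj : 0 < pj.length := hk
      have h1 : (pj.take 1).sum = pj.getD 0 0 := by
        have := pvS_succ pj 0 hpj; simpa using this
      simp [pvPref, pvLmax, pvLate, PySem.List.pyGetD_zero, h1, List.getD]
    · have hk1 : 1 ≤ k := Nat.pos_of_ne_zero hk0
      have hklt : k < pj.length := hk
      have hbeq : (((k : Nat) : Int) == 0) = false := by simp [hk0]
      have hc1 : ((k : Nat) : Int) - 1 = (((k - 1 : Nat)) : Int) := by omega
      simp only [List.foldl_cons, List.foldl_nil, hbeq, Bool.false_eq_true, if_false,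
        hc1, PySem.List.pyGetD_natCast]
      rw [hprefg pj k hk1, hfp pj k hklt, hfpg pj k]
      obtain ⟨j, rfl⟩ : ∃ j, k = j + 1 := ⟨k - 1, by omega⟩
      rw [pvLmax_succ]
      have hX : (pj.take (j+1+1)).sum - dj.getD (j+1) 0 = pvLate pj dj (j+1) := rfl
      rw [hX]
      simp only [Prod.mk.injEq]
      exact ⟨by omega, trivial⟩

-- ===== B-side characterisation =====

-- B's invariant: pvM pj dj k m = max lateness over jobs k..k+m, relative to the
-- suffix starting at k beginning at time 0 (exactly B's recursion).
def pvM (pj dj : List Int) : Nat → Nat → Int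
  | k, 0 => pj.getD k 0 - dj.getD k 0
  | k, m+1 => pj.getD k 0 + max (-(dj.getD k 0)) (pvM pj dj (k+1) m)

-- absolute lateness of job k+c relative to a schedule starting at job k at time 0
def pvLR (pj dj : List Int) (k c : Nat) : Int :=
  ((pj.drop k).take (c+1)).sum - dj.getD (k+c) 0

lemma pvTake_one_sum (pj : List Int) (k : Nat) :
    ((pj.drop k).take 1).sum = pj.getD k 0 := by
  cases e : pj.drop k with
  | nil =>
    have hlen : pj.length ≤ k := by
      by_contra hlt
      have := List.drop_eq_nil_iff.mp e
      omega
    simp [List.getD, List.getElem?_eq_none_iff.mpr hlen]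
  | cons x t =>
    have hx : pj[k]? = some x := by
      have h0 : (pj.drop k)[0]? = some x := by rw [e]; rfl
      rw [List.getElem?_drop] at h0
      simpa using h0
    simp [List.getD, hx]

lemma pvLR_zero (pj dj : List Int) (k : Nat) :
    pvLR pj dj k 0 = pj.getD k 0 - dj.getD k 0 := by
  simp [pvLR, pvTake_one_sum]

lemma pvLR_shift (pj dj : List Int) (k j : Nat) :
    pvLR pj dj k (j+1) = pj.getD k 0 + pvLR pj dj (k+1) j := by
  unfold pvLR
  have harg : k + (j+1) = (k+1) + j := by omega
  rw [harg]
  rcases lt_or_ge k pj.length with h | h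
  · rw [List.drop_eq_getElem_cons h, List.take_succ_cons, List.sum_cons]
    simp only [List.getD, List.getElem?_eq_getElem h, Option.getD_some]
    ring
  · rw [List.drop_eq_nil_of_le h, List.drop_eq_nil_of_le (by omega)]
    simp [List.getD, List.getElem?_eq_none_iff.mpr h]

lemma pvMax_foldl (l : List Int) : ∀ a b : Int, max a (l.foldl max b) = l.foldl max (max a b) := by
  induction l with
  | nil => intro a b; simp
  | cons x t ih =>
    intro a b
    simp only [List.foldl_cons, ih, max_assoc]

lemma pvAdd_foldl_max (l : List Int) : ∀ c a : Int, c + l.foldl max a = (l.map (c + ·)).foldl max (c + a) := by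
  induction l with
  | nil => intro c a; simp
  | cons x t ih =>
    intro c a
    simp only [List.foldl_cons, List.map_cons, ih, add_max]

-- B's recursion computes the running max of the suffix-relative latenesses
def pvF (pj dj : List Int) (k m : Nat) : Int :=
  ((List.range m).map (fun j => pvLR pj dj k (j+1))).foldl max (pvLR pj dj k 0)

lemma pvM_eq_F (pj dj : List Int) : ∀ (m k : Nat), pvM pj dj k m = pvF pj dj k m := by
  intro m
  induction m with
  | zero => intro k; simp [pvM, pvF, pvLR_zero]
  | succ m ih =>
    intro k
    have hMstep : pvM pj dj k (m+1)
        = max (pvLR pj dj k 0) (pj.getD k 0 + pvF pj dj (k+1) m) := by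
      simp only [pvM, ih (k+1), add_max, pvLR_zero, sub_eq_add_neg]
    rw [hMstep]
    unfold pvF
    rw [pvAdd_foldl_max]
    have hmap : ((List.range m).map (fun j => pvLR pj dj (k+1) (j+1))).map (pj.getD k 0 + ·)
        = (List.range m).map (fun j => pvLR pj dj k (j+2)) := by
      rw [List.map_map]
      exact List.map_congr_left (fun j _ => (pvLR_shift pj dj k (j+1)).symm)
    rw [hmap, ← pvLR_shift pj dj k 0, pvMax_foldl]
    have hr : List.range (m+1) = 0 :: (List.range m).map Nat.succ := List.range_succ_eq_map
    rw [hr, List.map_cons, List.foldl_cons, List.map_map]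
    congr 1

-- pvF at k = 0 is exactly A's running max
lemma pvF_zero_eq_lmax (pj dj : List Int) (m : Nat) :
    pvF pj dj 0 m = pvLmax pj dj (m+1) := by
  unfold pvF pvLmax
  simp [pvLR, pvLate]

-- B's step function (after index normalisation)
def pvStep (pj dj : List Int) (i : Nat) (b : Option Int) : Option Int :=
  match b with
  | none => some (pj.getD i 0 - dj.getD i 0)
  | some v => some (pj.getD i 0 + max (-(dj.getD i 0)) v)

lemma bfoldr_some (pj dj : List Int) : ∀ (n m : Nat),
    (List.range n).foldr (pvStep pj dj) (some (pvM pj dj n m)) = some (pvM pj dj 0 (m + n)) := by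
  intro n
  induction n with
  | zero => intro m; simp
  | succ n ih =>
    intro m
    rw [List.range_succ, List.foldr_append]
    have hstep : (pvStep pj dj) n (some (pvM pj dj (n+1) m)) = some (pvM pj dj n (m+1)) := rfl
    rw [List.foldr_cons, List.foldr_nil, hstep, ih (m+1)]
    congr 2
    omega

lemma bfoldr_none (pj dj : List Int) (n : Nat) (hn : 1 ≤ n) :
    (List.range n).foldr (pvStep pj dj) none = some (pvM pj dj 0 (n - 1)) := by
  obtain ⟨m, rfl⟩ : ∃ m, n = m + 1 := ⟨n - 1, by omega⟩
  rw [List.range_succ, List.foldr_append, List.foldr_cons, List.foldr_nil]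
  have h0 : (pvStep pj dj) m none = some (pvM pj dj m 0) := rfl
  rw [h0, bfoldr_some]
  simp

-- ===== VERDICT (by name: the statement is the Claim_ definition above) =====
theorem max_lateness_spec : Claim_equal_max_lateness := by
  intro pj dj _ hpre
  unfold Spec_max_lateness max_lateness max_lateness_alt
  simp only [PySem.List.len_eq]
  rw [aloop pj dj pj.length le_rfl]
  have hrev : PySem.List.pyRange ((pj.length : Int) - 1) (-1) (-1)
      = (PySem.List.pyRange 0 (pj.length : Int) 1).reverse := by
    rw [PySem.List.pyRange_neg_one_eq_reverse]
    norm_num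
  rw [hrev, PySem.List.pyRange_zero_nat, List.foldl_reverse, List.foldr_map]
  have hfun : (fun (i : Nat) (b : Option Int) =>
      (fun (b : Option Int) (i : Int) =>
        match b with
        | none => some (PySem.List.pyGetD pj i 0 - PySem.List.pyGetD dj i 0)
        | some v => some (PySem.List.pyGetD pj i 0 + max (-(PySem.List.pyGetD dj i 0)) v)) b (↑i))
      = pvStep pj dj := by
    funext i b
    cases b <;> simp [pvStep, PySem.List.pyGetD_natCast]
  rw [hfun]
  cases hn : pj.length with
  | zero => simp [pvLmax]
  | succ m =>
    rw [bfoldr_none pj dj (m+1) (by omega)]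
    simp only [Nat.add_sub_cancel]
    rw [pvM_eq_F, pvF_zero_eq_lmax]
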